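-- pv_equiv track=rewrite | github.com/prography-6th-study/algorithm-code | seongwoo/2-방금그곡.py | solution
-- ===== SOURCE A (Python) =====
-- def solution(m, musicinfos):
--     m = m.replace("C#", 'H').replace("D#", 'I').replace("F#", 'J').replace("G#", 'K').replace("A#", 'L')
--     ret = []
--     for info in musicinfos:
--         s, e, name, sheet = info.split(',')
--         sheet = sheet.replace("C#", 'H').replace("D#", 'I').replace("F#", 'J').replace("G#", 'K').replace("A#", 'L')
--         sh, sm = map(int, s.split(':'))
--         eh, em = map(int, e.split(':'))
--         time = (eh - sh) * 60 + em - sm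
--         while len(sheet) < time:
--             sheet += sheet
--         if m in sheet[:time]:
--             ret.append([name, time, sh])
--     if not ret:
--         return "(None)"
--     ret.sort(key = lambda x: (x[1], -x[2]))
--     return ret.pop()[0]
-- ===== SOURCE B (Python) =====
-- _SUBS = (("C#", "H"), ("D#", "I"), ("F#", "J"), ("G#", "K"), ("A#", "L"))
--
-- def _clean(s):
--     for old, new in _SUBS:
--         s = s.replace(old, new)
--     return s
--
-- def _minutes(t):
--     h, mm = t.split(':')
--     return int(h) * 60 + int(mm)
--
-- def _match_record(m, info):
--     s, e, name, sheet = info.split(',')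
--     sheet = _clean(sheet)
--     time = _minutes(e) - _minutes(s)
--     if time <= len(sheet):
--         played = sheet[:time]
--     else:
--         played = ''.join(sheet[i % len(sheet)] for i in range(time))
--     if m in played:
--         return ((time, -int(s.split(':')[0])), name)
--     return None
--
-- def solution(m, musicinfos):
--     m = _clean(m)
--     best = None
--     for info in musicinfos:
--         hit = _match_record(m, info)
--         if hit is not None and (best is None or hit[0] >= best[0]):
--             best = hit
--     return "(None)" if best is None else best[1]
-- ===== Notes on version B (the rewrite author's own statement) =====
-- stated objective: alternative
-- what changed: B replaces A's collect-matches list + stable sort + pop with a single running-best (time,-start) accumulator updated with >=, replaces the sheet-doubling while loop with a direct cyclic index build of the first `time` notes, and parses times via a minutes helper instead of inline unpacking.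
import Mathlib
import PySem

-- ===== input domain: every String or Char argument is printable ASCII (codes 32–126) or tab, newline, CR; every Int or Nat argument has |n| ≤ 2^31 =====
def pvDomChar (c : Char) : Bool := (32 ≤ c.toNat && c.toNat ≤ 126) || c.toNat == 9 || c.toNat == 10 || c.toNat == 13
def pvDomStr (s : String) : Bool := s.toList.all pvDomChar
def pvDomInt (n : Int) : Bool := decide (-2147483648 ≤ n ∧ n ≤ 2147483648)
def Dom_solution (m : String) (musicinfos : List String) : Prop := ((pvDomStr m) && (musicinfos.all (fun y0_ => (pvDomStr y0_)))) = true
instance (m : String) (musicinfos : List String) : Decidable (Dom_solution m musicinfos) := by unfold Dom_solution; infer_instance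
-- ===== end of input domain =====

-- B replaces A's collect-matches list + stable sort + pop with a running-best fold, and A's sheet-doubling + slice with a direct cyclic build of the played prefix (alternative decomposition, same results).


-- ===== PORT A =====
-- A's chain of .replace calls
def subSharps (s : String) : String :=
  PySem.Str.replace (PySem.Str.replace (PySem.Str.replace (PySem.Str.replace (PySem.Str.replace s "C#" "H") "D#" "I") "F#" "J") "G#" "K") "A#" "L"

-- `while len(sheet) < time: sheet += sheet`; the `cs ≠ []` guard only makes the
-- computation total (Python diverges there; Pre_ excludes it)
def growC (cs : List Char) (time : Int) : List Char :=
  if h : (cs.length : Int) < time ∧ cs ≠ [] then growC (cs ++ cs) time else cs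
termination_by (time - cs.length).toNat
decreasing_by
  simp only [List.length_append]
  have : 0 < cs.length := List.length_pos_iff.mpr h.2
  omega

-- loop body of A's `for info in musicinfos`
def stepA (mC : List Char) (ret : List (String × Int × Int)) (info : String) : List (String × Int × Int) :=
  match PySem.Str.split? info "," with
  | some [s, e, name, sheet] =>
    let sheetC := (subSharps sheet).toList
    match PySem.Str.split? s ":", PySem.Str.split? e ":" with
    | some [sh1, sm1], some [eh1, em1] =>
      match PySem.Int.ofStr? sh1, PySem.Int.ofStr? sm1, PySem.Int.ofStr? eh1, PySem.Int.ofStr? em1 with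
      | some sh, some sm, some eh, some em =>
        let time := (eh - sh) * 60 + em - sm
        let sheet2 := growC sheetC time
        if PySem.Chars.isIn mC (PySem.List.slice sheet2 none (some time)) then
          ret ++ [(name, time, sh)]
        else ret
      | _, _, _, _ => ret
    | _, _ => ret
  | _ => ret

def solution (m : String) (musicinfos : List String) : String :=
  let mC := (subSharps m).toList
  let ret := musicinfos.foldl (stepA mC) []
  if ret = [] then "(None)"
  else
    match PySem.List.pop? (PySem.List.sorted2 ret (fun x => x.2.1) (fun x => -x.2.2)) (-1) with
    | some (x, _) => x.1
    | none => "(None)"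

-- ===== PORT B =====
-- B's `_clean`: a fold over the substitution table
def cleanB (s : String) : String :=
  [("C#", "H"), ("D#", "I"), ("F#", "J"), ("G#", "K"), ("A#", "L")].foldl
    (fun t p => PySem.Str.replace t p.1 p.2) s

-- B's `_minutes(t)`
def minutes? (t : String) : Option Int :=
  match PySem.Str.split? t ":" with
  | some [h, mm] =>
    match PySem.Int.ofStr? h, PySem.Int.ofStr? mm with
    | some hv, some mv => some (hv * 60 + mv)
    | _, _ => none
  | _ => none

-- `int(s.split(':')[0])`
def startHour? (s : String) : Option Int :=
  match PySem.Str.split? s ":" with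
  | some (h :: _) => PySem.Int.ofStr? h
  | _ => none

-- B's `played`: truncate, or build the first `time` notes by cyclic indexing
-- (the getD default is never reached on Pre_: there `cs ≠ []` in this branch)
def playedB (cs : List Char) (time : Int) : List Char :=
  if time ≤ (cs.length : Int) then PySem.List.slice cs none (some time)
  else (List.range time.toNat).map (fun i => cs.getD (i % cs.length) ' ')

-- B's `_match_record(m, info)`: None, or ((time, -start_hour), name)
def matchB (mC : List Char) (info : String) : Option ((Int × Int) × String) :=
  match PySem.Str.split? info "," with
  | some [s, e, name, sheet] =>
    let cs := (cleanB sheet).toList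
    match minutes? e, minutes? s with
    | some te, some ts =>
      let time := te - ts
      if PySem.Chars.isIn mC (playedB cs time) then
        match startHour? s with
        | some sh => some ((time, -sh), name)
        | none => none
      else none
    | _, _ => none
  | _ => none

-- Python tuple `>=` on pairs of ints
def keyGe (a b : Int × Int) : Bool := b.1 < a.1 || (a.1 == b.1 && b.2 ≤ a.2)

def solution_alt (m : String) (musicinfos : List String) : String :=
  let mC := (cleanB m).toList
  let best := musicinfos.foldl (fun best info =>
    match matchB mC info with
    | some hit =>
      match best with
      | none => some hit
      | some b => if keyGe hit.1 b.1 then some hit else best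
    | none => best) (none : Option ((Int × Int) × String))
  match best with
  | some b => b.2
  | none => "(None)"

-- ===== PRECONDITION & SPEC =====
-- Pre_ excludes exactly the records on which Python A does not return: a record that
-- does not split into 4 comma fields or whose times are not two ':'-separated ints
-- (ValueError), and a record whose sheet is empty while its duration is positive
-- (A's doubling loop diverges; B raises ZeroDivisionError there).
def infoOK (info : String) : Bool :=
  match PySem.Str.split? info "," with
  | some [s, e, _, sheet] =>
    match PySem.Str.split? s ":", PySem.Str.split? e ":" with
    | some [sh1, sm1], some [eh1, em1] =>
      match PySem.Int.ofStr? sh1, PySem.Int.ofStr? sm1, PySem.Int.ofStr? eh1, PySem.Int.ofStr? em1 with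
      | some sh, some sm, some eh, some em =>
        !((subSharps sheet).toList = ([] : List Char) && 0 < (eh - sh) * 60 + em - sm)
      | _, _, _, _ => false
    | _, _ => false
  | _ => false

def Pre_solution (m : String) (musicinfos : List String) : Prop :=
  ∀ info ∈ musicinfos, infoOK info = true
instance (m : String) (musicinfos : List String) : Decidable (Pre_solution m musicinfos) := by unfold Pre_solution; infer_instance

def pvWitness_solution : String × List String :=
  ("ABC", ["12:00,12:14,HELLO,C#DEF", "13:00,13:05,WORLD,ABCABCDEF"])

def Spec_solution (m : String) (musicinfos : List String) (out : String) : Prop := out = solution_alt m musicinfos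
instance (m : String) (musicinfos : List String) (out : String) : Decidable (Spec_solution m musicinfos out) := by unfold Spec_solution; infer_instance

-- ===== CLAIM (what is proved, stated in full; the proofs are below) =====
def Claim_equal_solution : Prop := ∀ (m : String) (musicinfos : List String), Dom_solution m musicinfos → Pre_solution m musicinfos → Spec_solution m musicinfos (solution m musicinfos)

-- ===== LEMMAS AND PROOFS =====

lemma cleanB_eq_subSharps (s : String) : cleanB s = subSharps s := rfl

-- strict lexicographic `<` on (Int × Int) keys, as Bool (Python tuple `<`)
def plt (p q : Int × Int) : Bool := decide (p.1 < q.1) || (!decide (q.1 < p.1) && decide (p.2 < q.2))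

def key (x : String × Int × Int) : Int × Int := (x.2.1, -x.2.2)

-- the comparison sorted2 uses, seen through `key`
def ltf (a b : String × Int × Int) : Bool := plt (key a) (key b)

def bestStep (b : Option (String × Int × Int)) (x : String × Int × Int) : Option (String × Int × Int) :=
  match b with
  | none => some x
  | some b0 => if keyGe (key x) (key b0) then some x else some b0

lemma keyGe_eq_not_plt (a b : Int × Int) : keyGe a b = !plt a b := by
  simp only [keyGe, plt]
  by_cases h1 : a.1 < b.1 <;> by_cases h2 : b.1 < a.1 <;> by_cases h3 : a.2 < b.2 <;>
    by_cases h4 : b.2 ≤ a.2 <;> by_cases h5 : a.1 = b.1 <;> simp_all <;> omega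

lemma plt_trans_not (a b c : Int × Int) (h1 : plt a b = true) (h2 : plt c b = false) :
    plt a c = true := by
  simp only [plt] at *
  by_cases g1 : a.1 < b.1 <;> by_cases g2 : b.1 < a.1 <;> by_cases g3 : a.2 < b.2 <;>
    by_cases g4 : c.1 < b.1 <;> by_cases g5 : b.1 < c.1 <;> by_cases g6 : c.2 < b.2 <;>
    by_cases g7 : a.1 < c.1 <;> by_cases g8 : c.1 < a.1 <;> by_cases g9 : a.2 < c.2 <;>
    simp_all <;> omega

lemma plt_false_trans (a b c : Int × Int) (h1 : plt a b = false) (h2 : plt b c = false) :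
    plt a c = false := by
  simp only [plt] at *
  by_cases g1 : a.1 < b.1 <;> by_cases g2 : b.1 < a.1 <;> by_cases g3 : a.2 < b.2 <;>
    by_cases g4 : b.1 < c.1 <;> by_cases g5 : c.1 < b.1 <;> by_cases g6 : b.2 < c.2 <;>
    by_cases g7 : a.1 < c.1 <;> by_cases g8 : c.1 < a.1 <;> by_cases g9 : a.2 < c.2 <;>
    simp_all <;> omega

lemma plt_irrefl (a : Int × Int) : plt a a = false := by
  simp [plt]

lemma plt_asymm (a b : Int × Int) (h : plt a b = true) : plt b a = false := by
  simp only [plt] at *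
  by_cases g1 : a.1 < b.1 <;> by_cases g2 : b.1 < a.1 <;> by_cases g3 : a.2 < b.2 <;>
    by_cases g4 : b.2 < a.2 <;> simp_all <;> omega

lemma insertBy_ne_nil {α : Type} (f : α → α → Bool) (x : α) (l : List α) :
    PySem.List.insertBy f x l ≠ [] := by
  cases l with
  | nil => simp [PySem.List.insertBy]
  | cons y ys =>
    simp only [PySem.List.insertBy]
    split <;> simp

lemma mem_insertBy {α : Type} (f : α → α → Bool) (x y : α) (l : List α) :
    y ∈ PySem.List.insertBy f x l ↔ y = x ∨ y ∈ l := by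
  induction l with
  | nil => simp [PySem.List.insertBy]
  | cons z zs ih =>
    simp only [PySem.List.insertBy]
    split
    · simp
    · simp only [List.mem_cons, ih]; tauto

lemma getLast?_insertBy {α : Type} (f : α → α → Bool) (x : α) (l : List α) :
    (PySem.List.insertBy f x l).getLast? = if l.any (f x) then l.getLast? else some x := by
  induction l with
  | nil => simp [PySem.List.insertBy]
  | cons z zs ih =>
    simp only [PySem.List.insertBy, List.any_cons]
    split
    · next h =>
      simp only [h, Bool.true_or, if_true]
      cases zs <;> simp [List.getLast?_cons_cons]
    · next h =>
      simp only [Bool.not_eq_true] at h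
      simp only [h, Bool.false_or]
      have hne := insertBy_ne_nil f x zs
      cases hrec : PySem.List.insertBy f x zs with
      | nil => exact absurd hrec hne
      | cons w ws =>
        rw [List.getLast?_cons_cons, ← hrec, ih]
        cases zs with
        | nil => simp
        | cons u us => simp [List.getLast?_cons_cons]

-- invariant: the last element of the accumulated sorted list is a maximum
def IsMaxLast (l : List (String × Int × Int)) : Prop :=
  ∀ b, l.getLast? = some b → ∀ y ∈ l, plt (key b) (key y) = false

lemma insertBy_step (x : String × Int × Int) (acc : List (String × Int × Int))
    (hinv : IsMaxLast acc) :
    (PySem.List.insertBy ltf x acc).getLast? = bestStep acc.getLast? x := by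
  rw [getLast?_insertBy]
  cases hL : acc.getLast? with
  | none =>
    have : acc = [] := List.getLast?_eq_none_iff.mp hL
    subst this; simp [bestStep]
  | some b =>
    have hb : b ∈ acc := List.mem_of_getLast? hL
    have hmax := hinv b hL
    have hany : acc.any (ltf x) = plt (key x) (key b) := by
      cases hpx : plt (key x) (key b) with
      | true =>
        simp only [List.any_eq_true]
        exact ⟨b, hb, hpx⟩
      | false =>
        simp only [List.any_eq_false]
        intro y hy hxy
        have := plt_trans_not (key x) (key y) (key b) hxy (hmax y hy)
        rw [this] at hpx; cases hpx
    rw [hany, bestStep, keyGe_eq_not_plt]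
    cases hpx : plt (key x) (key b) <;> simp

lemma insertBy_inv (x : String × Int × Int) (acc : List (String × Int × Int))
    (hinv : IsMaxLast acc) : IsMaxLast (PySem.List.insertBy ltf x acc) := by
  intro b' hb' y hy
  rw [insertBy_step x acc hinv] at hb'
  rw [mem_insertBy] at hy
  cases hL : acc.getLast? with
  | none =>
    have : acc = [] := List.getLast?_eq_none_iff.mp hL
    subst this
    simp only [List.getLast?_nil, bestStep, Option.some.injEq] at hb'
    subst hb'
    rcases hy with rfl | hy
    · exact plt_irrefl _
    · simp at hy
  | some b =>
    have hmax := hinv b hL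
    rw [hL] at hb'
    simp only [bestStep, keyGe_eq_not_plt] at hb'
    cases hpx : plt (key x) (key b) with
    | true =>
      rw [hpx] at hb'
      simp at hb'
      subst hb'
      rcases hy with rfl | hy
      · exact plt_asymm _ _ hpx
      · exact hmax y hy
    | false =>
      rw [hpx] at hb'
      simp at hb'
      subst hb'
      rcases hy with rfl | hy
      · exact plt_irrefl _
      · exact plt_false_trans _ _ _ hpx (hmax y hy)

lemma sortedFold_getLast (M acc : List (String × Int × Int)) (hinv : IsMaxLast acc) :
    (M.foldl (fun a x => PySem.List.insertBy ltf x a) acc).getLast?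
      = M.foldl bestStep acc.getLast? ∧
    IsMaxLast (M.foldl (fun a x => PySem.List.insertBy ltf x a) acc) := by
  induction M generalizing acc with
  | nil => exact ⟨rfl, hinv⟩
  | cons x xs ih =>
    simp only [List.foldl_cons]
    have h1 := insertBy_step x acc hinv
    have h2 := insertBy_inv x acc hinv
    have := ih (PySem.List.insertBy ltf x acc) h2
    rw [h1] at this
    exact this

lemma sorted2_getLast (M : List (String × Int × Int)) :
    (PySem.List.sorted2 M (fun x => x.2.1) (fun x => -x.2.2)).getLast?
      = M.foldl bestStep none := by
  have h0 : IsMaxLast ([] : List (String × Int × Int)) := by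
    intro b hb; simp at hb
  have h := (sortedFold_getLast M [] h0).1
  simp only [List.getLast?_nil] at h
  show (M.foldl (fun a x => PySem.List.insertBy ltf x a) []).getLast? = M.foldl bestStep none
  exact h

-- A's doubled sheet is the cyclic extension of the sheet: nonempty, a multiple of
-- the original length, long enough, and cyclic position by position
lemma growC_inv (cs : List Char) (time : Int) (l : List Char) (hne : l ≠ [])
    (hdvd : cs.length ∣ l.length)
    (hcyc : ∀ i, i < l.length → ∀ d, l.getD i d = cs.getD (i % cs.length) d) :
    growC l time ≠ [] ∧ time ≤ ((growC l time).length : Int) ∧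
    (∀ i, i < (growC l time).length → ∀ d, (growC l time).getD i d = cs.getD (i % cs.length) d) := by
  rw [growC]
  split
  · next h =>
    apply growC_inv cs time (l ++ l) (by simp [hne])
    · simpa [List.length_append] using Dvd.dvd.add hdvd hdvd
    · intro i hi d
      rw [List.length_append] at hi
      by_cases hil : i < l.length
      · rw [List.getD_append _ _ _ _ hil]; exact hcyc i hil d
      · push_neg at hil
        rw [List.getD_append_right _ _ _ _ hil]
        obtain ⟨k, hk⟩ := hdvd
        have h1 := hcyc (i - l.length) (by omega) d
        rw [h1]
        congr 1
        conv_rhs => rw [show i = i - l.length + cs.length * k by omega]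
        rw [Nat.add_mul_mod_self_left]
  · next h =>
    refine ⟨hne, ?_, hcyc⟩
    have : ¬ ((l.length : Int) < time) := by tauto
    omega
termination_by (time - l.length).toNat
decreasing_by
  simp only [List.length_append]
  have : 0 < l.length := List.length_pos_iff.mpr hne
  omega

-- the two builds of the played prefix agree off A's divergence region
lemma played_eq (cs : List Char) (time : Int) (hok : ¬(cs = [] ∧ 0 < time)) :
    PySem.List.slice (growC cs time) none (some time) = playedB cs time := by
  unfold playedB
  by_cases hle : time ≤ (cs.length : Int)
  · rw [if_pos hle, growC]
    rw [dif_neg (by intro ⟨h1, _⟩; omega)]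
  · rw [if_neg hle]
    push_neg at hle
    have hne : cs ≠ [] := by
      intro hc; subst hc; simp at hle; exact hok ⟨rfl, by omega⟩
    have hinv := growC_inv cs time cs hne ⟨1, by ring⟩
      (fun i hi d => by rw [Nat.mod_eq_of_lt hi])
    obtain ⟨hGne, hGlen, hGcyc⟩ := hinv
    have htnn : (0 : Int) ≤ time := by omega
    rw [PySem.List.slice_to _ htnn]
    apply List.ext_getElem
    · simp only [List.length_take, List.length_map, List.length_range]
      omega
    · intro i h1 h2
      simp only [List.length_take] at h1
      have hiG : i < (growC cs time).length := by omega
      simp only [List.getElem_take, List.getElem_map, List.getElem_range]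
      rw [← List.getD_eq_getElem _ ' ' hiG, hGcyc i hiG ' ']

-- per-record: A's loop body seen through B's `_match_record`, on records A returns on
lemma minutes?_pair (t hS mS : String) (hv mv : Int)
    (hsp : PySem.Str.split? t ":" = some [hS, mS])
    (hh : PySem.Int.ofStr? hS = some hv) (hm : PySem.Int.ofStr? mS = some mv) :
    minutes? t = some (hv * 60 + mv) := by
  unfold minutes?; rw [hsp]; simp [hh, hm]

lemma startHour?_eq (s hS mS : String) (hv : Int)
    (hsp : PySem.Str.split? s ":" = some [hS, mS])
    (hh : PySem.Int.ofStr? hS = some hv) :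
    startHour? s = some hv := by
  unfold startHour?; rw [hsp]; simpa using hh

set_option maxHeartbeats 1000000 in
lemma stepA_eq_matchB (mC : List Char) (ret : List (String × Int × Int)) (info : String)
    (hok : infoOK info = true) :
    stepA mC ret info
      = match matchB mC info with
        | some kn => ret ++ [(kn.2, kn.1.1, -kn.1.2)]
        | none => ret := by
  unfold infoOK at hok
  unfold stepA matchB
  cases h1 : PySem.Str.split? info "," with
  | none => simp [h1] at hok
  | some parts =>
    rcases parts with _ | ⟨s, _ | ⟨e, _ | ⟨name, _ | ⟨sheet, _ | ⟨x, rest⟩⟩⟩⟩⟩ <;>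
      try simp [h1] at hok
    cases h2 : PySem.Str.split? s ":" with
    | none => simp [h2] at hok
    | some ps =>
      rcases ps with _ | ⟨sh1, _ | ⟨sm1, _ | ⟨y, ys⟩⟩⟩ <;> try simp [h2] at hok
      cases h3 : PySem.Str.split? e ":" with
      | none => simp [h3] at hok
      | some pe =>
        rcases pe with _ | ⟨eh1, _ | ⟨em1, _ | ⟨z, zs⟩⟩⟩ <;> try simp [h3] at hok
        cases h4 : PySem.Int.ofStr? sh1 with
        | none => simp [h4] at hok
        | some sh =>
          cases h5 : PySem.Int.ofStr? sm1 with
          | none => simp [h4, h5] at hok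
          | some sm =>
            cases h6 : PySem.Int.ofStr? eh1 with
            | none => simp [h4, h5, h6] at hok
            | some eh =>
              cases h7 : PySem.Int.ofStr? em1 with
              | none => simp [h4, h5, h6, h7] at hok
              | some em =>
                simp [h4, h5, h6, h7] at hok
                have hok' : ¬((subSharps sheet).toList = [] ∧ 0 < (eh - sh) * 60 + em - sm) := by
                  intro ⟨ha, hb⟩
                  rcases hok with h | h
                  · exact h (by simpa using ha)
                  · omega
                simp only [h2, h3, h4, h5, h6, h7]
                simp only [minutes?_pair e eh1 em1 eh em h3 h6 h7,
                  minutes?_pair s sh1 sm1 sh sm h2 h4 h5,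
                  startHour?_eq s sh1 sm1 sh h2 h4]
                rw [cleanB_eq_subSharps,
                  show eh * 60 + em - (sh * 60 + sm) = (eh - sh) * 60 + em - sm from by ring,
                  ← played_eq ((subSharps sheet).toList) ((eh - sh) * 60 + em - sm) hok']
                split <;> simp

-- A's whole loop: the matched records, in input order (on Pre_-good records)
lemma foldA_eq (mC : List Char) (infos : List String) (acc : List (String × Int × Int))
    (hok : ∀ info ∈ infos, infoOK info = true) :
    infos.foldl (stepA mC) acc
      = acc ++ infos.filterMap (fun i => (matchB mC i).map (fun kn => (kn.2, kn.1.1, -kn.1.2))) := by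
  induction infos generalizing acc with
  | nil => simp
  | cons i is ih =>
    simp only [List.foldl_cons, List.filterMap_cons]
    rw [stepA_eq_matchB mC acc i (hok i (by simp)),
      ih _ (fun j hj => hok j (List.mem_cons_of_mem _ hj))]
    cases matchB mC i <;> simp

def bestStepP (b : Option ((Int × Int) × String)) (kn : (Int × Int) × String) :
    Option ((Int × Int) × String) :=
  match b with
  | none => some kn
  | some b0 => if keyGe kn.1 b0.1 then some kn else some b0

-- B's whole loop: the same fold over the matched records only
lemma foldB_eq (mC : List Char) (infos : List String) (b : Option ((Int × Int) × String)) :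
    infos.foldl (fun best info =>
      match matchB mC info with
      | some hit =>
        match best with
        | none => some hit
        | some b0 => if keyGe hit.1 b0.1 then some hit else best
      | none => best) b
      = (infos.filterMap (matchB mC)).foldl bestStepP b := by
  induction infos generalizing b with
  | nil => rfl
  | cons i is ih =>
    simp only [List.foldl_cons, List.filterMap_cons]
    cases h : matchB mC i with
    | none => exact ih b
    | some kn =>
      simp only [List.foldl_cons]
      rw [← ih]
      cases b <;> rfl

def toPair (x : String × Int × Int) : (Int × Int) × String := (key x, x.1)

lemma foldP_map (M : List (String × Int × Int)) (o : Option (String × Int × Int)) :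
    (M.map toPair).foldl bestStepP (o.map toPair) = (M.foldl bestStep o).map toPair := by
  induction M generalizing o with
  | nil => rfl
  | cons x xs ih =>
    simp only [List.map_cons, List.foldl_cons]
    have h : bestStepP (o.map toPair) (toPair x) = (bestStep o x).map toPair := by
      cases o with
      | none => rfl
      | some b0 =>
        simp only [bestStepP, bestStep, Option.map_some, toPair]
        split <;> rfl
    rw [h, ← ih]

lemma filterMap_matchB (mC : List Char) (infos : List String) :
    infos.filterMap (matchB mC)
      = (infos.filterMap (fun i => (matchB mC i).map (fun kn => (kn.2, kn.1.1, -kn.1.2)))).map toPair := by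
  rw [List.map_filterMap]
  apply List.filterMap_congr
  intro i _
  cases matchB mC i with
  | none => rfl
  | some kn => simp [toPair, key]

lemma foldBest_ne_none (M : List (String × Int × Int)) (o : Option (String × Int × Int))
    (h : M ≠ [] ∨ o ≠ none) : M.foldl bestStep o ≠ none := by
  induction M generalizing o with
  | nil => tauto
  | cons x xs ih =>
    simp only [List.foldl_cons]
    apply ih
    right
    cases o with
    | none => simp [bestStep]
    | some b0 => simp only [bestStep]; split <;> simp

-- ===== VERDICT (by name: the statement is the Claim_ definition above) =====
theorem solution_spec : Claim_equal_solution := by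
  intro m musicinfos _ hpre
  unfold Spec_solution solution solution_alt
  simp only [cleanB_eq_subSharps]
  rw [foldB_eq, filterMap_matchB, foldA_eq _ _ _ hpre]
  simp only [List.nil_append]
  set M := musicinfos.filterMap (fun i => (matchB (subSharps m).toList i).map (fun kn => (kn.2, kn.1.1, -kn.1.2))) with hM
  have hfold := foldP_map M none
  simp only [Option.map_none] at hfold
  rw [hfold]
  by_cases hMnil : M = []
  · simp [hMnil]
  · rw [if_neg hMnil]
    have hlast := sorted2_getLast M
    have hne : M.foldl bestStep none ≠ none := foldBest_ne_none M none (Or.inl hMnil)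
    cases hbest : M.foldl bestStep none with
    | none => exact absurd hbest hne
    | some best =>
      rw [hbest] at hlast
      have hsne : PySem.List.sorted2 M (fun x => x.2.1) (fun x => -x.2.2) ≠ [] := by
        intro hc
        rw [hc] at hlast; simp at hlast
      have hsplit := (List.dropLast_concat_getLast hsne).symm
      rw [hsplit, PySem.List.pop?_last]
      rw [hsplit] at hlast
      simp only [List.getLast?_concat, Option.some.injEq] at hlast
      rw [hlast]
      simp [toPair]
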